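-- pv_equiv track=rewrite | github.com/Nicochung/python-event-log | helper.py | parseEventString
-- ===== SOURCE A (Python) =====
-- def categorizeTag(word: str) -> tuple:
--     # Remove case where there is only a symbol # or @ in the word
--     if len(word) <= 1:
--         return [None, word]
--     if word.find('#') == 0:
--         return ['category', word[1:]]
--     if word.find('@') == 0:
--         return ['person', word[1:]]
--     return [None, word]
--
-- def parseEventString(eventString: str) ->  dict:
--     wordList = eventString.split(" ")
--     tagObj = {'category': [], 'person': []}
--     for word in wordList:
--         tag = categorizeTag(word)
--         # Dont have tag
--         if tag[0] is None:
--             continue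
--         tagObj[tag[0]].append(tag[1])
--     tagObj['category'].sort()
--     tagObj['person'].sort()
--     return tagObj
-- ===== SOURCE B (Python) =====
-- def parseEventString(eventString: str) -> dict:
--     # Single character-level state machine: no split(), no per-word classifier.
--     category, person = [], []
--     bucket = None   # leading '#' or '@' of the current word, else None
--     buf = []        # characters of the current word after its first character
--     start = True    # True while waiting for the first character of a word
--     for ch in eventString:
--         if ch == ' ':
--             if bucket == '#' and buf:
--                 category.append(''.join(buf))
--             elif bucket == '@' and buf:
--                 person.append(''.join(buf))
--             bucket, buf, start = None, [], True
--         elif start: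
--             bucket = ch if ch in '#@' else None
--             start = False
--         else:
--             buf.append(ch)
--     if bucket == '#' and buf:
--         category.append(''.join(buf))
--     elif bucket == '@' and buf:
--         person.append(''.join(buf))
--     category.sort()
--     person.sort()
--     return {'category': category, 'person': person}
-- ===== Notes on version B (the rewrite author's own statement) =====
-- stated objective: alternative
-- what changed: B replaces split-then-classify with a single character-level state machine over the raw string (tracking the current word's leading tag character and its suffix buffer, flushing at each space), so the word list and the per-word classifier disappear; the two buckets are sorted at the end as in A.
import Mathlib
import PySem

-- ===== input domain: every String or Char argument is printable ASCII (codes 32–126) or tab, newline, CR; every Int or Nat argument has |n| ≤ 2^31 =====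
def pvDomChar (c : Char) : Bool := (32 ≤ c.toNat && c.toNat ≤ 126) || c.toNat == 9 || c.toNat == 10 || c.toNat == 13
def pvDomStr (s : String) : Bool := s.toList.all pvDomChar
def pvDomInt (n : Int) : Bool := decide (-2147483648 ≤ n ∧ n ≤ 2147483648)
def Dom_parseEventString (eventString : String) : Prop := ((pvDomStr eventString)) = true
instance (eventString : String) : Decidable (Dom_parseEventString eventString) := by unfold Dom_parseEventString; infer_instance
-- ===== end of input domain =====

-- B replaces A's split-then-classify with a single character-level state machine over the raw string; return values proved equal on all inputs.

-- ===== PORT A =====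
def categorizeTag (word : String) : Option String × String :=
  if PySem.Str.len word ≤ 1 then (none, word)
  else if PySem.Str.find word "#" = 0 then (some "category", PySem.Str.slice word (some 1) none)
  else if PySem.Str.find word "@" = 0 then (some "person", PySem.Str.slice word (some 1) none)
  else (none, word)

-- loop body of A's for-loop, as a named helper
def stepA (d : PySem.Dict String (List String)) (word : String) : PySem.Dict String (List String) :=
  let tag := categorizeTag word
  match tag.1 with
  | none => d
  | some k => d.modify k [] (fun l => l ++ [tag.2])

def parseEventString (eventString : String) : List (String × List String) :=
  let wordList := (PySem.Str.split? eventString " ").getD []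
  let tagObj : PySem.Dict String (List String) :=
    PySem.Dict.ofList [("category", []), ("person", [])]
  let tagObj := wordList.foldl stepA tagObj
  let tagObj := tagObj.insert "category" (PySem.List.sorted (tagObj.getD "category" []) (fun x => x))
  let tagObj := tagObj.insert "person" (PySem.List.sorted (tagObj.getD "person" []) (fun x => x))
  tagObj.items

-- ===== PORT B =====
-- machine state: (category, person, bucket = leading '#'/'@' of the current word or none,
--                 buf = characters of the current word after its first one, start flag)
def StB : Type := List String × List String × Option Char × List Char × Bool

-- loop body of B's character loop
def stepB (st : StB) (ch : Char) : StB :=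
  match st with
  | (cat, per, bucket, buf, start) =>
    if ch = ' ' then
      if bucket = some '#' ∧ buf ≠ [] then (cat ++ [String.ofList buf], per, none, [], true)
      else if bucket = some '@' ∧ buf ≠ [] then (cat, per ++ [String.ofList buf], none, [], true)
      else (cat, per, none, [], true)
    else if start then (cat, per, (if ch = '#' ∨ ch = '@' then some ch else none), buf, false)
    else (cat, per, bucket, buf ++ [ch], start)

-- B's final flush after the loop
def flushB (st : StB) : List String × List String :=
  match st with
  | (cat, per, bucket, buf, _) =>
    if bucket = some '#' ∧ buf ≠ [] then (cat ++ [String.ofList buf], per)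
    else if bucket = some '@' ∧ buf ≠ [] then (cat, per ++ [String.ofList buf])
    else (cat, per)

def parseEventString_alt (eventString : String) : List (String × List String) :=
  let st := eventString.toList.foldl stepB ([], [], none, [], true)
  let res := flushB st
  [("category", PySem.List.sorted res.1 (fun x => x)), ("person", PySem.List.sorted res.2 (fun x => x))]

-- ===== PRECONDITION & SPEC =====
def Spec_parseEventString (eventString : String) (out : List (String × List String)) : Prop := out = parseEventString_alt eventString
instance (eventString : String) (out : List (String × List String)) : Decidable (Spec_parseEventString eventString out) := by unfold Spec_parseEventString; infer_instance

-- ===== CLAIM (what is proved, stated in full; the proofs are below) =====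
def Claim_equal_parseEventString : Prop := ∀ (eventString : String), Dom_parseEventString eventString → Spec_parseEventString eventString (parseEventString eventString)

-- ===== LEMMAS AND PROOFS =====

-- classifier as two option-valued extractors (proof-side helpers)
def fCat (w : String) : Option String :=
  if PySem.Str.len w ≤ 1 then none
  else if PySem.Str.find w "#" = 0 then some (PySem.Str.slice w (some 1) none)
  else none

def fPer (w : String) : Option String :=
  if PySem.Str.len w ≤ 1 then none
  else if PySem.Str.find w "#" = 0 then none
  else if PySem.Str.find w "@" = 0 then some (PySem.Str.slice w (some 1) none)
  else none

lemma find_eq_zero_iff (s p : String) :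
    PySem.Str.find s p = 0 ↔ PySem.Str.startswith s p = true := by
  rw [PySem.Str.find_eq, PySem.Str.startswith_eq, PySem.Chars.startswith_iff]
  rw [← PySem.Chars.findFrom_zero]
  constructor
  · intro h
    have hspec := PySem.Chars.findFrom_natCast_spec s.toList p.toList 0 (Nat.zero_le _) (by rw [Nat.cast_zero, h]; decide)
    rw [Nat.cast_zero, h] at hspec
    simpa using hspec.2.1
  · intro h
    have hne : PySem.Chars.findFrom s.toList p.toList 0 ≠ -1 := by
      rw [PySem.Chars.findFrom_zero, PySem.Chars.find_ne_neg_one_iff]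
      exact h.isInfix
    have hspec := PySem.Chars.findFrom_natCast_spec s.toList p.toList 0 (Nat.zero_le _) (by rw [Nat.cast_zero]; exact hne)
    rw [Nat.cast_zero] at hspec
    by_contra hne0
    have hpos : 0 < (PySem.Chars.findFrom s.toList p.toList 0).toNat := by omega
    exact hspec.2.2 0 (Nat.zero_le _) hpos (by simpa using h)

-- A-side case lemmas -----------------------------------------------------

lemma dict2_modify_cat (c p : List String) (f : List String → List String) :
    (PySem.Dict.mk [("category", c), ("person", p)]).modify "category" [] f
      = PySem.Dict.mk [("category", f c), ("person", p)] := by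
  simp [PySem.Dict.modify, PySem.Dict.insert, PySem.Dict.getD, PySem.Dict.get?]

lemma dict2_modify_per (c p : List String) (f : List String → List String) :
    (PySem.Dict.mk [("category", c), ("person", p)]).modify "person" [] f
      = PySem.Dict.mk [("category", c), ("person", f p)] := by
  simp [PySem.Dict.modify, PySem.Dict.insert, PySem.Dict.getD, PySem.Dict.get?]

lemma fCat_of_short (w : String) (h1 : PySem.Str.len w <= 1) : fCat w = none := by
  unfold fCat; rw [if_pos h1]
lemma fPer_of_short (w : String) (h1 : PySem.Str.len w <= 1) : fPer w = none := by
  unfold fPer; rw [if_pos h1]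
lemma fCat_of_hash (w : String) (h1 : ¬ PySem.Str.len w <= 1) (h2 : PySem.Str.find w "#" = 0) :
    fCat w = some (PySem.Str.slice w (some 1) none) := by
  unfold fCat; rw [if_neg h1, if_pos h2]
lemma fPer_of_hash (w : String) (h1 : ¬ PySem.Str.len w <= 1) (h2 : PySem.Str.find w "#" = 0) :
    fPer w = none := by
  unfold fPer; rw [if_neg h1, if_pos h2]
lemma fCat_of_at (w : String) (h1 : ¬ PySem.Str.len w <= 1) (h2 : ¬ PySem.Str.find w "#" = 0) :
    fCat w = none := by
  unfold fCat; rw [if_neg h1, if_neg h2]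
lemma fPer_of_at (w : String) (h1 : ¬ PySem.Str.len w <= 1) (h2 : ¬ PySem.Str.find w "#" = 0)
    (h3 : PySem.Str.find w "@" = 0) : fPer w = some (PySem.Str.slice w (some 1) none) := by
  unfold fPer; rw [if_neg h1, if_neg h2, if_pos h3]
lemma fPer_of_none (w : String) (h1 : ¬ PySem.Str.len w <= 1) (h2 : ¬ PySem.Str.find w "#" = 0)
    (h3 : ¬ PySem.Str.find w "@" = 0) : fPer w = none := by
  unfold fPer; rw [if_neg h1, if_neg h2, if_neg h3]

lemma stepA_eq (d : PySem.Dict String (List String)) (w : String) :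
    stepA d w = match (categorizeTag w).1 with
      | none => d
      | some k => d.modify k [] (fun l => l ++ [(categorizeTag w).2]) := rfl

lemma categorizeTag_of_short (w : String) (h1 : PySem.Str.len w <= 1) :
    categorizeTag w = (none, w) := by unfold categorizeTag; rw [if_pos h1]
lemma categorizeTag_of_hash (w : String) (h1 : ¬ PySem.Str.len w <= 1) (h2 : PySem.Str.find w "#" = 0) :
    categorizeTag w = (some "category", PySem.Str.slice w (some 1) none) := by
  unfold categorizeTag; rw [if_neg h1, if_pos h2]
lemma categorizeTag_of_at (w : String) (h1 : ¬ PySem.Str.len w <= 1) (h2 : ¬ PySem.Str.find w "#" = 0)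
    (h3 : PySem.Str.find w "@" = 0) :
    categorizeTag w = (some "person", PySem.Str.slice w (some 1) none) := by
  unfold categorizeTag; rw [if_neg h1, if_neg h2, if_pos h3]
lemma categorizeTag_of_none (w : String) (h1 : ¬ PySem.Str.len w <= 1) (h2 : ¬ PySem.Str.find w "#" = 0)
    (h3 : ¬ PySem.Str.find w "@" = 0) : categorizeTag w = (none, w) := by
  unfold categorizeTag; rw [if_neg h1, if_neg h2, if_neg h3]

lemma foldA (ws : List String) (c p : List String) :
    ws.foldl stepA (PySem.Dict.mk [("category", c), ("person", p)])
      = PySem.Dict.mk [("category", c ++ ws.filterMap fCat), ("person", p ++ ws.filterMap fPer)] := by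
  induction ws generalizing c p with
  | nil => simp
  | cons w ws ih =>
    rw [List.foldl_cons, List.filterMap_cons, List.filterMap_cons]
    by_cases h1 : PySem.Str.len w <= 1
    · rw [stepA_eq, categorizeTag_of_short w h1, fCat_of_short w h1, fPer_of_short w h1, ih]
    · by_cases h2 : PySem.Str.find w "#" = 0
      · rw [stepA_eq, categorizeTag_of_hash w h1 h2, fCat_of_hash w h1 h2, fPer_of_hash w h1 h2]
        show List.foldl stepA ((PySem.Dict.mk [("category", c), ("person", p)]).modify "category" []
          (fun l => l ++ [PySem.Str.slice w (some 1) none])) ws = _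
        rw [dict2_modify_cat, ih, List.append_assoc]
        rfl
      · by_cases h3 : PySem.Str.find w "@" = 0
        · rw [stepA_eq, categorizeTag_of_at w h1 h2 h3, fCat_of_at w h1 h2, fPer_of_at w h1 h2 h3]
          show List.foldl stepA ((PySem.Dict.mk [("category", c), ("person", p)]).modify "person" []
            (fun l => l ++ [PySem.Str.slice w (some 1) none])) ws = _
          rw [dict2_modify_per, ih, List.append_assoc]
          rfl
        · rw [stepA_eq, categorizeTag_of_none w h1 h2 h3, fCat_of_at w h1 h2, fPer_of_none w h1 h2 h3, ih]

lemma dict2_insert_cat (c p v : List String) :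
    (PySem.Dict.mk [("category", c), ("person", p)]).insert "category" v
      = PySem.Dict.mk [("category", v), ("person", p)] := by
  simp [PySem.Dict.insert]

lemma dict2_insert_per (c p v : List String) :
    (PySem.Dict.mk [("category", c), ("person", p)]).insert "person" v
      = PySem.Dict.mk [("category", c), ("person", v)] := by
  simp [PySem.Dict.insert]

lemma dict2_getD_cat (c p : List String) :
    (PySem.Dict.mk [("category", c), ("person", p)]).getD "category" [] = c := by
  simp [PySem.Dict.getD, PySem.Dict.get?]

lemma dict2_getD_per (c p : List String) :
    (PySem.Dict.mk [("category", c), ("person", p)]).getD "person" [] = p := by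
  simp [PySem.Dict.getD, PySem.Dict.get?]

-- tokenization: PySem's split on a single space, characterized structurally --------

def toks : List Char → List (List Char)
  | [] => [[]]
  | c :: cs => if c = ' ' then [] :: toks cs else (c :: (toks cs).headI) :: (toks cs).tail

def modHead (w : List Char) : List (List Char) → List (List Char)
  | [] => [w]
  | t :: ts => (w ++ t) :: ts

lemma toks_ne_nil (cs : List Char) : toks cs ≠ [] := by
  cases cs with
  | nil => simp [toks]
  | cons c cs => unfold toks; split <;> simp

lemma go_spec : ∀ (fuel : Nat) (l cur : List Char) (acc : List (List Char)), l.length < fuel →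
    PySem.Chars.splitOn.go [' '] fuel l cur acc = acc.reverse ++ modHead cur.reverse (toks l) := by
  intro fuel
  induction fuel with
  | zero => intro l cur acc h; omega
  | succ fuel ih =>
    intro l cur acc h
    cases l with
    | nil => simp [PySem.Chars.splitOn.go, toks, modHead]
    | cons c rest =>
      rw [PySem.Chars.splitOn.go]
      by_cases hc : c = ' '
      · subst hc
        simp only [List.isPrefixOf]
        rw [if_pos (by simp)]
        simp only [List.length_singleton, List.drop_succ_cons, List.drop_zero]
        rw [ih rest [] (cur.reverse :: acc) (by simpa using Nat.lt_of_succ_lt_succ h)]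
        simp [toks]
        cases htk : toks rest with
        | nil => exact absurd htk (toks_ne_nil rest)
        | cons t ts => simp [modHead]
      · rw [if_neg (by simp [List.isPrefixOf]; exact fun hp => hc hp.symm)]
        rw [ih rest (c :: cur) acc (by simpa using Nat.lt_of_succ_lt_succ h)]
        simp only [toks, if_neg hc]
        cases htk : toks rest with
        | nil => exact absurd htk (toks_ne_nil rest)
        | cons t ts => simp [modHead]

lemma splitOn_eq_toks (cs : List Char) : PySem.Chars.splitOn cs [' '] = toks cs := by
  rw [PySem.Chars.splitOn, go_spec cs.length.succ cs [] [] (Nat.lt_succ_self _)]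
  cases h : toks cs with
  | nil => exact absurd h (toks_ne_nil cs)
  | cons t ts => simp [modHead]

-- the classifiers on explicit character lists ------------------------------

lemma len_ofList (w : List Char) : PySem.Str.len (String.ofList w) = w.length := by
  simp [PySem.Str.len_eq]

lemma find_head_zero_iff (w : List Char) (c : Char) (p : String) (hp : p.toList = [c]) :
    PySem.Str.find (String.ofList w) p = 0 ↔ w.head? = some c := by
  rw [find_eq_zero_iff, PySem.Str.startswith_eq, PySem.Chars.startswith_iff,
    String.toList_ofList, hp]
  cases w with
  | nil => simp
  | cons a as =>
    constructor
    · intro h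
      obtain ⟨t, ht⟩ := h
      simp at ht
      simp [ht.1]
    · intro h
      simp at h
      exact ⟨as, by simp [h]⟩

lemma slice_one_ofList (c : Char) (r : List Char) :
    PySem.Str.slice (String.ofList (c :: r)) (some 1) none = String.ofList r := by
  apply String.toList_inj.mp
  rw [PySem.Str.toList_slice, PySem.Chars.slice_eq_listSlice, PySem.List.slice_from_one]
  simp

lemma fCat_ofList_cons (c : Char) (r : List Char) (hr : r ≠ []) :
    fCat (String.ofList (c :: r)) = if c = '#' then some (String.ofList r) else none := by
  have h1 : ¬ PySem.Str.len (String.ofList (c :: r)) ≤ 1 := by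
    rw [len_ofList]; simp; cases r with | nil => exact absurd rfl hr | cons x xs => simp
  by_cases hc : c = '#'
  · subst hc
    rw [fCat_of_hash _ h1 ((find_head_zero_iff _ '#' "#" rfl).mpr (by simp)), slice_one_ofList, if_pos rfl]
  · rw [fCat_of_at _ h1 (fun h => hc (by simpa using (find_head_zero_iff _ '#' "#" rfl).mp h)), if_neg hc]

lemma fPer_ofList_cons (c : Char) (r : List Char) (hr : r ≠ []) :
    fPer (String.ofList (c :: r)) = if c = '@' then some (String.ofList r) else none := by
  have h1 : ¬ PySem.Str.len (String.ofList (c :: r)) ≤ 1 := by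
    rw [len_ofList]; simp; cases r with | nil => exact absurd rfl hr | cons x xs => simp
  by_cases hc : c = '@'
  · subst hc
    rw [fPer_of_at _ h1 (fun h => by simpa using (find_head_zero_iff _ '#' "#" rfl).mp h)
        ((find_head_zero_iff _ '@' "@" rfl).mpr (by simp)), slice_one_ofList, if_pos rfl]
  · by_cases hh : c = '#'
    · subst hh
      rw [fPer_of_hash _ h1 ((find_head_zero_iff _ '#' "#" rfl).mpr (by simp)), if_neg (by decide)]
    · rw [fPer_of_none _ h1 (fun h => hh (by simpa using (find_head_zero_iff _ '#' "#" rfl).mp h))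
        (fun h => hc (by simpa using (find_head_zero_iff _ '@' "@" rfl).mp h)), if_neg hc]

lemma fCat_ofList_short (w : List Char) (hw : w.length ≤ 1) : fCat (String.ofList w) = none :=
  fCat_of_short _ (by rw [len_ofList]; exact_mod_cast hw)
lemma fPer_ofList_short (w : List Char) (hw : w.length ≤ 1) : fPer (String.ofList w) = none :=
  fPer_of_short _ (by rw [len_ofList]; exact_mod_cast hw)

-- B-side machine invariant -------------------------------------------------

-- the machine state after reading the prefix w of the current word
def encSt (cat per : List String) (w : List Char) : StB :=
  (cat, per,
   (match w with | [] => none | c :: _ => if c = '#' ∨ c = '@' then some c else none),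
   w.tail, w.isEmpty)

lemma flushB_encSt (cat per : List String) (w : List Char) :
    flushB (encSt cat per w)
      = (cat ++ (fCat (String.ofList w)).toList, per ++ (fPer (String.ofList w)).toList) := by
  cases w with
  | nil =>
    simp [flushB, encSt, fCat_ofList_short [] (by simp), fPer_ofList_short [] (by simp)]
  | cons c r =>
    cases r with
    | nil =>
      simp [flushB, encSt, fCat_ofList_short [c] (by simp), fPer_ofList_short [c] (by simp)]
    | cons x xs =>
      rw [fCat_ofList_cons c (x :: xs) (by simp), fPer_ofList_cons c (x :: xs) (by simp)]
      by_cases hc : c = '#'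
      · subst hc; simp [flushB, encSt]
      · by_cases ha : c = '@'
        · subst ha; simp [flushB, encSt]
        · simp [flushB, encSt, hc, ha]

lemma stepB_space (cat per : List String) (w : List Char) :
    stepB (encSt cat per w) ' '
      = encSt (cat ++ (fCat (String.ofList w)).toList) (per ++ (fPer (String.ofList w)).toList) [] := by
  have h := flushB_encSt cat per w
  cases w with
  | nil => simp [flushB, encSt] at h ⊢; simp [stepB, h.1, h.2]
  | cons c r =>
    simp only [flushB, encSt] at h ⊢
    simp only [stepB]
    split_ifs at h ⊢ with h1 h2 <;> simp_all

lemma stepB_nonspace_nil (cat per : List String) (ch : Char) (h : ¬ ch = ' ') :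
    stepB (encSt cat per []) ch = encSt cat per [ch] := by
  simp [stepB, encSt, h]

lemma stepB_nonspace_cons (cat per : List String) (c : Char) (r : List Char) (ch : Char)
    (h : ¬ ch = ' ') : stepB (encSt cat per (c :: r)) ch = encSt cat per (c :: (r ++ [ch])) := by
  simp [stepB, encSt, h]

lemma filterMap_cons_toList {α β : Type} (g : α → Option β) (t : α) (ts : List α) :
    List.filterMap g (t :: ts) = (g t).toList ++ List.filterMap g ts := by
  cases h : g t <;> simp [h]

lemma foldB_main : ∀ (cs : List Char) (cat per : List String) (w : List Char),
    flushB (cs.foldl stepB (encSt cat per w))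
      = (cat ++ (modHead w (toks cs)).filterMap (fun t => fCat (String.ofList t)),
         per ++ (modHead w (toks cs)).filterMap (fun t => fPer (String.ofList t))) := by
  intro cs
  induction cs with
  | nil =>
    intro cat per w
    simp only [List.foldl_nil, flushB_encSt, toks, modHead]
    simp [filterMap_cons_toList]
  | cons ch cs ih =>
    intro cat per w
    rw [List.foldl_cons]
    by_cases hch : ch = ' '
    · subst hch
      rw [stepB_space, ih]
      have hmod : modHead w (toks (' ' :: cs)) = w :: toks cs := by
        simp [toks, modHead]
      have hnil : modHead [] (toks cs) = toks cs := by
        cases h : toks cs with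
        | nil => exact absurd h (toks_ne_nil cs)
        | cons t ts => simp [modHead]
      rw [hmod, hnil, filterMap_cons_toList, filterMap_cons_toList, List.append_assoc, List.append_assoc]
    · have hmod : modHead w (toks (ch :: cs)) = modHead (w ++ [ch]) (toks cs) := by
        cases h : toks cs with
        | nil => exact absurd h (toks_ne_nil cs)
        | cons t ts => simp [toks, hch, h, modHead]
      cases w with
      | nil => rw [stepB_nonspace_nil cat per ch hch, ih, hmod]; simp
      | cons c r => rw [stepB_nonspace_cons cat per c r ch hch, ih, hmod]; simp

-- ===== VERDICT (by name: the statement is the Claim_ definition above) =====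
theorem parseEventString_spec : Claim_equal_parseEventString := by
  intro s _
  unfold Spec_parseEventString parseEventString parseEventString_alt
  dsimp only
  have hsplit : (PySem.Str.split? s " ").getD [] = (toks s.toList).map String.ofList := by
    rw [PySem.Str.split?, PySem.Chars.split?]
    simp [splitOn_eq_toks]
  have hofList : (PySem.Dict.ofList [("category", ([] : List String)), ("person", [])])
      = PySem.Dict.mk [("category", []), ("person", [])] := rfl
  rw [hsplit, hofList, foldA, dict2_getD_cat, dict2_insert_cat, dict2_getD_per, dict2_insert_per]
  have hinit : (([], [], none, [], true) : StB) = encSt [] [] [] := rfl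
  rw [hinit, foldB_main]
  have hnil : modHead [] (toks s.toList) = toks s.toList := by
    cases h : toks s.toList with
    | nil => exact absurd h (toks_ne_nil s.toList)
    | cons t ts => simp [modHead]
  rw [hnil, List.filterMap_map, List.filterMap_map]
  simp
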